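-- pv_equiv track=rewrite | github.com/Bhagyashree-Rawal/Monte-Carlo-Tree-Search | Simulator.py | calculate_total_yield
-- ===== SOURCE A (Python) =====
-- def calculate_total_yield(M):
--     """
--     input M : list of list of size n * n
--     output total_yield : total yield of crops in the field
--     """
--     total_yield = 0
--     for i in range(len(M[0])):
--         for j in range(len(M[0])):
--             # Case 1 : if there is a corn crop in the i,j cell of the field
--             if M[i][j] == 'c':
--                 # Following code checks the number of bean crops adjacent to the corn crop
--                 adjacent_beans = 0
--                 k = i-1
--                 l = j-1
--                 while k <= i+1:
--                     if k >= 0 and k < len(M[0]) :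
--                         while l <= j+1:
--                             if l >= 0 and l < len(M[0]):
--                                 if M[k][l] == 'b':
--                                     adjacent_beans += 1
--                             l += 1
--                     l = j-1
--                     k += 1
--                 total_yield += 10 + adjacent_beans
--
--             # Case 2 : if there is a bean crop in the i,j cell of the field
--             if M[i][j] == 'b':
--                 # Following code checks the number of corn crops adjacent to the bean crop
--                 adjacent_corns = 0
--                 k = i-1
--                 l = j-1
--                 while k <= i+1:
--                     if k >= 0 and k < len(M[0]):
--                         while l <= j+1:
--                             if l >= 0 and l < len(M[0]):
--                                 if M[k][l] == 'c':
--                                     adjacent_corns += 1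
--                             l += 1
--                     l = j-1
--                     k += 1
--                 if adjacent_corns > 0:
--                     total_yield += 15
--                 else:
--                     total_yield += 10
--             #print (i,j,M[i][j],total_yield)
--     return total_yield
-- ===== SOURCE B (Python) =====
-- def calculate_total_yield(M):
--     """
--     input M : list of list of size n * n
--     output total_yield : total yield of crops in the field
--     """
--     n = len(M[0])
--     corns = [(i, j) for i in range(n) for j in range(n) if M[i][j] == 'c']
--     beans = [(i, j) for i in range(n) for j in range(n) if M[i][j] == 'b']
--     total = 10 * (len(corns) + len(beans))
--     for (i, j) in corns:
--         total += sum(1 for (k, l) in beans if abs(i - k) <= 1 and abs(j - l) <= 1)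
--     for (i, j) in beans:
--         if any(abs(i - k) <= 1 and abs(j - l) <= 1 for (k, l) in corns):
--             total += 5
--     return total
-- ===== Notes on version B (the rewrite author's own statement) =====
-- stated objective: alternative
-- what changed: Replaces A's per-cell nested while-loop 3x3 window scans with a position-list formulation: collect corn and bean coordinate lists once, start from the closed form 10*(corns+beans), then add corn-bean Chebyshev-distance-1 pair counts and a 5-bonus for beans with any adjacent corn.
import Mathlib
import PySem

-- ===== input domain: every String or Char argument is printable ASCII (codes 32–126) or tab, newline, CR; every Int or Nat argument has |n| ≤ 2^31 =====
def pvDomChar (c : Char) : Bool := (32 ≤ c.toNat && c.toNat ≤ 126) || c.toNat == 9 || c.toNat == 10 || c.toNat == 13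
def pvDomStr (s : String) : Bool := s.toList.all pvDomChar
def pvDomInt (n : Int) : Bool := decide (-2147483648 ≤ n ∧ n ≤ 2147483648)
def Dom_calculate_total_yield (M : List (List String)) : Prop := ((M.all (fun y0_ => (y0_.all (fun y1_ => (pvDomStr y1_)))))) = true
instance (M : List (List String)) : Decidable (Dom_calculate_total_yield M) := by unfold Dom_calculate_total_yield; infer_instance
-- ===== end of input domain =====

-- B replaces A's per-cell nested while-loop window scans by a position-list formulation
-- (coordinate lists + Chebyshev-distance pair counting); alternative decomposition, not faster.

-- ===== PORT A =====
-- M[k][l] (indices are only used with 0 ≤ idx < n; outside Pre_ Python raises, the default is never claimed about)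
def pvCell (M : List (List String)) (k l : Int) : String :=
  PySem.List.pyGetD (PySem.List.pyGetD M k []) l ""

-- A's inner 'while l <= j+1' loop
def pvWhileL (M : List (List String)) (n k : Int) (t : String) (lmax l acc : Int) : Int :=
  if _h : l ≤ lmax then
    pvWhileL M n k t lmax (l + 1)
      (if 0 ≤ l ∧ l < n then (if pvCell M k l == t then acc + 1 else acc) else acc)
  else acc
termination_by (lmax + 1 - l).toNat
decreasing_by omega

-- A's outer 'while k <= i+1' loop (l is reset to l0 on every iteration)
def pvWhileK (M : List (List String)) (n : Int) (t : String) (l0 lmax kmax k acc : Int) : Int :=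
  if _h : k ≤ kmax then
    pvWhileK M n t l0 lmax kmax (k + 1)
      (if 0 ≤ k ∧ k < n then pvWhileL M n k t lmax l0 acc else acc)
  else acc
termination_by (kmax + 1 - k).toNat
decreasing_by omega

def calculate_total_yield (M : List (List String)) : Int :=
  let n : Int := (PySem.List.pyGetD M 0 []).length
  (PySem.List.pyRange 0 n 1).foldl (fun ty i =>
    (PySem.List.pyRange 0 n 1).foldl (fun ty j =>
      let ty := if pvCell M i j == "c" then
          ty + (10 + pvWhileK M n "b" (j - 1) (j + 1) (i + 1) (i - 1) 0) else ty
      if pvCell M i j == "b" then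
        (if pvWhileK M n "c" (j - 1) (j + 1) (i + 1) (i - 1) 0 > 0 then ty + 15 else ty + 10)
      else ty) ty) 0

-- ===== PORT B =====
def pvNear (p q : Int × Int) : Bool :=
  decide ((p.1 - q.1).natAbs ≤ 1) && decide ((p.2 - q.2).natAbs ≤ 1)

def calculate_total_yield_alt (M : List (List String)) : Int :=
  let n : Int := (PySem.List.pyGetD M 0 []).length
  let ps := (PySem.List.pyRange 0 n 1).flatMap
      (fun i => (PySem.List.pyRange 0 n 1).map (fun j => (i, j)))
  let corns := ps.filter (fun p => pvCell M p.1 p.2 == "c")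
  let beans := ps.filter (fun p => pvCell M p.1 p.2 == "b")
  let total : Int := 10 * ((corns.length : Int) + (beans.length : Int))
  let total := corns.foldl
      (fun acc p => acc + ((beans.filter (fun q => pvNear p q)).length : Int)) total
  let total := beans.foldl
      (fun acc p => acc + (if corns.any (fun q => pvNear p q) then 5 else 0)) total
  total

-- ===== PRECONDITION & SPEC =====
-- Pre_ = exactly the inputs where A returns: M nonempty, and the square read window of side
-- n = len(M[0]) exists (at least n rows, each of the first n rows of length ≥ n).
def Pre_calculate_total_yield (M : List (List String)) : Prop :=
  M ≠ [] ∧ (M.headD []).length ≤ M.length ∧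
    ∀ row ∈ M.take (M.headD []).length, (M.headD []).length ≤ row.length
instance (M : List (List String)) : Decidable (Pre_calculate_total_yield M) := by
  unfold Pre_calculate_total_yield; infer_instance

def pvWitness_calculate_total_yield : List (List String) := [["c", "b"], ["b", "x"]]

def Spec_calculate_total_yield (M : List (List String)) (out : Int) : Prop := out = calculate_total_yield_alt M
instance (M : List (List String)) (out : Int) : Decidable (Spec_calculate_total_yield M out) := by unfold Spec_calculate_total_yield; infer_instance

-- ===== CLAIM (what is proved, stated in full; the proofs are below) =====
def Claim_equal_calculate_total_yield : Prop := ∀ (M : List (List String)), Dom_calculate_total_yield M → Pre_calculate_total_yield M → Spec_calculate_total_yield M (calculate_total_yield M)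

-- ===== LEMMAS AND PROOFS =====

-- per-cell indicator: l in column range and cell (k,l) equals t
def pvW (M : List (List String)) (n k l : Int) (t : String) : Int :=
  if 0 ≤ l ∧ l < n then (if pvCell M k l == t then 1 else 0) else 0

-- value of one 3x3 window gather on cell (i,j)
def pvWin (M : List (List String)) (n i j : Int) (t : String) : Int :=
  (if 0 ≤ i - 1 ∧ i - 1 < n then pvW M n (i-1) (j-1) t + pvW M n (i-1) j t + pvW M n (i-1) (j+1) t else 0) +
  (if 0 ≤ i ∧ i < n then pvW M n i (j-1) t + pvW M n i j t + pvW M n i (j+1) t else 0) +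
  (if 0 ≤ i + 1 ∧ i + 1 < n then pvW M n (i+1) (j-1) t + pvW M n (i+1) j t + pvW M n (i+1) (j+1) t else 0)

theorem pvWhileL_spec (M : List (List String)) (n k : Int) (t : String) (lmax : Int) :
    ∀ (l acc : Int), pvWhileL M n k t lmax l acc =
      acc + ((PySem.List.pyRange l (lmax + 1) 1).map (fun x => pvW M n k x t)).sum := by
  intro l acc
  induction l, acc using pvWhileL.induct M n k t lmax with
  | case1 l acc h ih =>
    rw [pvWhileL]
    simp only [dif_pos h]
    simp only [dite_eq_ite] at ih
    rw [ih, PySem.List.pyRange_one_cons (show l < lmax + 1 by omega)]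
    simp only [List.map_cons, List.sum_cons, pvW]
    split_ifs <;> ring
  | case2 l acc h =>
    rw [pvWhileL]
    simp only [dif_neg h]
    rw [PySem.List.pyRange_one_eq_nil (by omega)]
    simp

theorem pvWhileK_spec' (M : List (List String)) (n : Int) (t : String) (l0 lmax kmax : Int) :
    ∀ (k acc : Int), pvWhileK M n t l0 lmax kmax k acc =
      acc + ((PySem.List.pyRange k (kmax + 1) 1).map (fun x =>
        if 0 ≤ x ∧ x < n then ((PySem.List.pyRange l0 (lmax + 1) 1).map (fun y => pvW M n x y t)).sum else 0)).sum := by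
  intro k acc
  induction k, acc using pvWhileK.induct M n t l0 lmax kmax with
  | case1 k acc h ih =>
    rw [pvWhileK]
    simp only [dif_pos h]
    simp only [dite_eq_ite] at ih
    rw [ih, PySem.List.pyRange_one_cons (show k < kmax + 1 by omega)]
    simp only [List.map_cons, List.sum_cons]
    rw [pvWhileL_spec]
    split_ifs <;> ring
  | case2 k acc h =>
    rw [pvWhileK]
    simp only [dif_neg h]
    rw [PySem.List.pyRange_one_eq_nil (show kmax + 1 ≤ k by omega)]
    simp

theorem pvRange3 (a : Int) : PySem.List.pyRange a (a + 2 + 1) 1 = [a, a + 1, a + 2] := by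
  rw [PySem.List.pyRange_one_cons (by omega), PySem.List.pyRange_one_cons (by omega),
    PySem.List.pyRange_one_cons (by omega), PySem.List.pyRange_one_eq_nil (by omega)]
  have : a + 1 + 1 = a + 2 := by ring
  rw [this]

theorem pvWhileK_spec (M : List (List String)) (n : Int) (t : String) (i j : Int) :
    pvWhileK M n t (j - 1) (j + 1) (i + 1) (i - 1) 0 = pvWin M n i j t := by
  rw [pvWhileK_spec']
  have h1 : PySem.List.pyRange (i-1) (i+1+1) 1 = [i-1, i, i+1] := by
    have := pvRange3 (i-1)
    simp only [show i - 1 + 1 = i by ring, show i - 1 + 2 = i + 1 by ring] at this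
    exact this
  have h2 : PySem.List.pyRange (j-1) (j+1+1) 1 = [j-1, j, j+1] := by
    have := pvRange3 (j-1)
    simp only [show j - 1 + 1 = j by ring, show j - 1 + 2 = j + 1 by ring] at this
    exact this
  rw [h1]
  simp only [List.map_cons, List.map_nil, List.sum_cons, List.sum_nil, h2, pvWin]
  ring

-- 1D: a Chebyshev-1 indicator summed over range 0..m-1 collapses to the three candidate terms
theorem pvOneD (m : Nat) (c : Int) (f : Int → Int) :
    ((List.range m).map (fun (x : Nat) => if (c - (x : Int)).natAbs ≤ 1 then f (x : Int) else 0)).sum =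
      (if 0 ≤ c - 1 ∧ c - 1 < (m : Int) then f (c - 1) else 0) +
      (if 0 ≤ c ∧ c < (m : Int) then f c else 0) +
      (if 0 ≤ c + 1 ∧ c + 1 < (m : Int) then f (c + 1) else 0) := by
  induction m with
  | zero => simp only [List.range_zero, List.map_nil, List.sum_nil]
            rw [if_neg (by omega), if_neg (by omega), if_neg (by omega)]
            norm_num
  | succ m ih =>
    rw [List.range_succ, List.map_append, List.sum_append]
    rw [ih]
    simp only [List.map_cons, List.map_nil, List.sum_cons, List.sum_nil]
    push_cast
    by_cases h1 : c - 1 = (m : Int)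
    · rw [show ((m : Nat) : Int) = c - 1 from h1.symm]
      split_ifs <;> omega
    · by_cases h2 : c = (m : Int)
      · rw [show ((m : Nat) : Int) = c from h2.symm]
        split_ifs <;> omega
      · by_cases h3 : c + 1 = (m : Int)
        · rw [show ((m : Nat) : Int) = c + 1 from h3.symm]
          split_ifs <;> omega
        · split_ifs <;> omega

theorem pvSumFlatMap {A B : Type} (l : List A) (f : A → List B) (g : B → Int) :
    ((l.flatMap f).map g).sum = (l.map (fun a => ((f a).map g).sum)).sum := by
  rw [List.map_flatMap, List.flatMap_def, List.sum_flatten, List.map_map]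
  rfl

theorem pvLenFilter {A : Type} (l : List A) (p : A → Bool) :
    (((l.filter p).length : Nat) : Int) = (l.map (fun a => if p a then (1 : Int) else 0)).sum := by
  rw [PySem.List.sum_map_ite_one_zero, List.countP_eq_length_filter]

theorem pvSumIteFilter {A : Type} (l : List A) (p : A → Bool) (g : A → Int) :
    (l.map (fun a => if p a then g a else 0)).sum = ((l.filter p).map g).sum := by
  induction l with
  | nil => rfl
  | cons x xs ih =>
    simp only [List.map_cons, List.sum_cons, List.filter_cons]
    by_cases h : p x = true
    · simp [h, ih]
    · simp [h, ih]

-- the position list of B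
def pvPs (m : Nat) : List (Int × Int) :=
  (PySem.List.pyRange 0 (m : Int) 1).flatMap
    (fun i => (PySem.List.pyRange 0 (m : Int) 1).map (fun j => (i, j)))

-- B's pair count over the full position grid equals the 3x3 window gather
theorem pvCountNear (M : List (List String)) (m : Nat) (t : String) (p : Int × Int) :
    ((((pvPs m).filter (fun q => pvCell M q.1 q.2 == t)).filter (fun q => pvNear p q)).length : Int)
      = pvWin M (m : Int) p.1 p.2 t := by
  rw [List.filter_filter, pvLenFilter, pvPs, pvSumFlatMap]
  have hinner : ∀ i : Int,
      (((PySem.List.pyRange 0 (m : Int) 1).map (fun j => (i, j))).map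
        (fun a => if (pvNear p a && (pvCell M a.1 a.2 == t) : Bool) then (1 : Int) else 0)).sum =
      if (p.1 - i).natAbs ≤ 1 then
        pvW M (m : Int) i (p.2 - 1) t + pvW M (m : Int) i p.2 t + pvW M (m : Int) i (p.2 + 1) t
      else 0 := by
    intro i
    rw [List.map_map, PySem.List.pyRange_zero_nat, List.map_map]
    by_cases hA : (p.1 - i).natAbs ≤ 1
    · rw [if_pos hA]
      have h1D := pvOneD m p.2 (fun y : Int => if pvCell M i y == t then (1 : Int) else 0)
      refine Eq.trans (congrArg List.sum (List.map_congr_left fun x _ => ?_)) (h1D.trans ?_)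
      · simp only [Function.comp_apply, pvNear, hA, decide_true, Bool.and_eq_true,
          decide_eq_true_eq]
        rw [ite_and]
        simp
      · simp only [pvW]
    · rw [if_neg hA]
      refine Eq.trans (b := (List.map (fun _ : Nat => (0 : Int)) (List.range m)).sum)
        (congrArg List.sum (List.map_congr_left fun x _ => ?_)) ?_
      · simp [pvNear, hA]
      · simp
  simp only [hinner]
  rw [PySem.List.pyRange_zero_nat, List.map_map]
  have h1D := pvOneD m p.1 (fun y : Int =>
    pvW M (m : Int) y (p.2 - 1) t + pvW M (m : Int) y p.2 t + pvW M (m : Int) y (p.2 + 1) t)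
  refine Eq.trans (congrArg List.sum (List.map_congr_left fun x _ => ?_)) (h1D.trans ?_)
  · simp only [Function.comp_apply]
  · rfl

-- B's any-adjacent test decides positivity of the window gather
theorem pvAnyNear (M : List (List String)) (m : Nat) (t : String) (p : Int × Int) :
    (((pvPs m).filter (fun q => pvCell M q.1 q.2 == t)).any (fun q => pvNear p q)) = true ↔
      0 < pvWin M (m : Int) p.1 p.2 t := by
  rw [List.any_eq_true, ← pvCountNear M m t p]
  rw [← List.length_filter_pos_iff]
  exact Int.natCast_pos.symm

-- A's per-cell contribution
def pvContrib (M : List (List String)) (n : Int) (q : Int × Int) : Int :=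
  (if pvCell M q.1 q.2 == "c" then 10 + pvWin M n q.1 q.2 "b" else 0) +
  (if pvCell M q.1 q.2 == "b" then 10 + (if 0 < pvWin M n q.1 q.2 "c" then 5 else 0) else 0)

theorem pvA_eq (M : List (List String)) : calculate_total_yield M =
    ((pvPs ((PySem.List.pyGetD M 0 []).length)).map
      (fun q => pvContrib M (((PySem.List.pyGetD M 0 []).length : Nat) : Int) q)).sum := by
  have h0 : calculate_total_yield M =
      (PySem.List.pyRange 0 (((PySem.List.pyGetD M 0 []).length : Nat) : Int) 1).foldl (fun ty i =>
        (PySem.List.pyRange 0 (((PySem.List.pyGetD M 0 []).length : Nat) : Int) 1).foldl (fun ty j =>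
          let ty := if pvCell M i j == "c" then
              ty + (10 + pvWhileK M (((PySem.List.pyGetD M 0 []).length : Nat) : Int) "b" (j - 1) (j + 1) (i + 1) (i - 1) 0) else ty
          if pvCell M i j == "b" then
            (if pvWhileK M (((PySem.List.pyGetD M 0 []).length : Nat) : Int) "c" (j - 1) (j + 1) (i + 1) (i - 1) 0 > 0 then ty + 15 else ty + 10)
          else ty) ty) 0 := rfl
  rw [h0]
  set m : Nat := (PySem.List.pyGetD M 0 []).length with hm
  have hinner : (fun (ty : Int) (i : Int) =>
      (PySem.List.pyRange 0 (m : Int) 1).foldl (fun ty j =>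
        let ty := if pvCell M i j == "c" then
            ty + (10 + pvWhileK M (m : Int) "b" (j - 1) (j + 1) (i + 1) (i - 1) 0) else ty
        if pvCell M i j == "b" then
          (if pvWhileK M (m : Int) "c" (j - 1) (j + 1) (i + 1) (i - 1) 0 > 0 then ty + 15 else ty + 10)
        else ty) ty) =
      (fun (ty : Int) (i : Int) =>
        ty + ((PySem.List.pyRange 0 (m : Int) 1).map (fun j => pvContrib M (m : Int) (i, j))).sum) := by
    funext ty i
    have hb : (fun (ty : Int) (j : Int) =>
        let ty := if pvCell M i j == "c" then
            ty + (10 + pvWhileK M (m : Int) "b" (j - 1) (j + 1) (i + 1) (i - 1) 0) else ty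
        if pvCell M i j == "b" then
          (if pvWhileK M (m : Int) "c" (j - 1) (j + 1) (i + 1) (i - 1) 0 > 0 then ty + 15 else ty + 10)
        else ty) = (fun (ty : Int) (j : Int) => ty + pvContrib M (m : Int) (i, j)) := by
      funext ty j
      simp only [pvContrib, pvWhileK_spec, gt_iff_lt]
      split_ifs <;> ring
    rw [hb, PySem.List.foldl_add]
  rw [hinner, PySem.List.foldl_add, zero_add, pvPs, pvSumFlatMap]
  refine congrArg List.sum (List.map_congr_left fun i _ => ?_)
  rw [List.map_map]
  rfl

theorem pvB_eq (M : List (List String)) : calculate_total_yield_alt M =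
    10 * (((((pvPs ((PySem.List.pyGetD M 0 []).length)).filter (fun p => pvCell M p.1 p.2 == "c")).length : Nat) : Int) +
          ((((pvPs ((PySem.List.pyGetD M 0 []).length)).filter (fun p => pvCell M p.1 p.2 == "b")).length : Nat) : Int)) +
    (((pvPs ((PySem.List.pyGetD M 0 []).length)).filter (fun p => pvCell M p.1 p.2 == "c")).map
      (fun p => (((((pvPs ((PySem.List.pyGetD M 0 []).length)).filter (fun p => pvCell M p.1 p.2 == "b")).filter
        (fun q => pvNear p q)).length : Nat) : Int))).sum +
    (((pvPs ((PySem.List.pyGetD M 0 []).length)).filter (fun p => pvCell M p.1 p.2 == "b")).map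
      (fun p => if ((pvPs ((PySem.List.pyGetD M 0 []).length)).filter (fun p => pvCell M p.1 p.2 == "c")).any
        (fun q => pvNear p q) then (5 : Int) else 0)).sum := by
  have h0 : calculate_total_yield_alt M =
      ((pvPs ((PySem.List.pyGetD M 0 []).length)).filter (fun p => pvCell M p.1 p.2 == "b")).foldl
        (fun acc p => acc + (if ((pvPs ((PySem.List.pyGetD M 0 []).length)).filter (fun p => pvCell M p.1 p.2 == "c")).any
          (fun q => pvNear p q) then (5 : Int) else 0))
        (((pvPs ((PySem.List.pyGetD M 0 []).length)).filter (fun p => pvCell M p.1 p.2 == "c")).foldl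
          (fun acc p => acc + (((((pvPs ((PySem.List.pyGetD M 0 []).length)).filter (fun p => pvCell M p.1 p.2 == "b")).filter
            (fun q => pvNear p q)).length : Nat) : Int))
          (10 * (((((pvPs ((PySem.List.pyGetD M 0 []).length)).filter (fun p => pvCell M p.1 p.2 == "c")).length : Nat) : Int) +
            ((((pvPs ((PySem.List.pyGetD M 0 []).length)).filter (fun p => pvCell M p.1 p.2 == "b")).length : Nat) : Int)))) := rfl
  rw [h0, PySem.List.foldl_add, PySem.List.foldl_add]

-- ===== VERDICT (by name: the statement is the Claim_ definition above) =====
theorem calculate_total_yield_spec : Claim_equal_calculate_total_yield := by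
  intro M _ _
  show calculate_total_yield M = calculate_total_yield_alt M
  rw [pvA_eq, pvB_eq]
  set m : Nat := (PySem.List.pyGetD M 0 []).length with hm
  simp only [pvContrib]
  rw [PySem.List.sum_map_add_int, pvSumIteFilter, pvSumIteFilter,
    PySem.List.sum_map_add_int, PySem.List.sum_map_add_int,
    PySem.List.sum_map_const_int, PySem.List.sum_map_const_int]
  rw [show List.map (fun p : Int × Int =>
      (((((pvPs m).filter (fun p => pvCell M p.1 p.2 == "b")).filter (fun q => pvNear p q)).length : Nat) : Int))
      ((pvPs m).filter (fun p => pvCell M p.1 p.2 == "c")) =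
    List.map (fun p : Int × Int => pvWin M (m : Int) p.1 p.2 "b")
      ((pvPs m).filter (fun p => pvCell M p.1 p.2 == "c")) from
    List.map_congr_left fun p _ => pvCountNear M m "b" p]
  rw [show List.map (fun p : Int × Int =>
      if ((pvPs m).filter (fun p => pvCell M p.1 p.2 == "c")).any (fun q => pvNear p q) then (5 : Int) else 0)
      ((pvPs m).filter (fun p => pvCell M p.1 p.2 == "b")) =
    List.map (fun p : Int × Int => if 0 < pvWin M (m : Int) p.1 p.2 "c" then (5 : Int) else 0)
      ((pvPs m).filter (fun p => pvCell M p.1 p.2 == "b")) from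
    List.map_congr_left fun p _ => by
      by_cases h : 0 < pvWin M (m : Int) p.1 p.2 "c"
      · rw [if_pos ((pvAnyNear M m "c" p).mpr h), if_pos h]
      · rw [if_neg (fun hc => h ((pvAnyNear M m "c" p).mp hc)), if_neg h]]
  ring
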